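-- pv_equiv track=rewrite | github.com/loveAlakazam/Sneaking_Algorithm | hash/hash4/베스트앨범_last_year_failed.py | orderedList
-- ===== SOURCE A (Python) =====
-- def orderedList(arr):
--     arr_index=[ arr.index(g) for g in arr]
--     tmp=None
--     max_sums=arr[0]
--     for i in range(len(arr)-1):
--         for j in range(i+1,len(arr)):
--             if arr[j]>max_sums:
--                 tmp=j
--                 arr_index[j]=i
--                 arr_index[i]=tmp
--                 max_sums=arr[j]
--     return arr_index
-- ===== SOURCE B (Python) =====
-- def orderedList(arr):
--     first = {}
--     for i, x in enumerate(arr):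
--         if x not in first:
--             first[x] = i
--     res = [first[x] for x in arr]
--     m = arr[0]
--     for j in range(1, len(arr)):
--         if arr[j] > m:
--             res[j] = 0
--             res[0] = j
--             m = arr[j]
--     return res
-- ===== Notes on version B (the rewrite author's own statement) =====
-- stated objective: faster
-- what changed: Replaced the per-element arr.index scan and the O(n^2) nested record loop by a one-pass first-occurrence dict plus a single running-maximum pass (only i=0 of A's outer loop can ever fire, since max_sums is already the global maximum afterwards).
import Mathlib
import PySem

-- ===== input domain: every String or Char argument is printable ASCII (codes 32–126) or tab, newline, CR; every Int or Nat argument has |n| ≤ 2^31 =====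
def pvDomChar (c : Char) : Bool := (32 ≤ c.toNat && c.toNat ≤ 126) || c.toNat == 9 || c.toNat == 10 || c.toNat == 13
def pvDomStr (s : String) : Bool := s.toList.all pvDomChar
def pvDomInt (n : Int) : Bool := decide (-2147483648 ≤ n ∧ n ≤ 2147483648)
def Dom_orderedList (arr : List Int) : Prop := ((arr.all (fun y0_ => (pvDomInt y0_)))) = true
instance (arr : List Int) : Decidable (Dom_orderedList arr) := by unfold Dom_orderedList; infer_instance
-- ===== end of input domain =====

-- B replaces A's per-element arr.index scans and O(n^2) nested record loop by a first-occurrence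
-- dict and a single running-maximum pass (objective: faster, asymptotic O(n^2) → O(n)).

-- ===== PORT A =====
-- A's inner-loop body (tmp / index writes / max_sums update, in A's order)
-- (all indices produced by range are in bounds, so pyGetD/pySetD are exact here)
def stepA (arr : List Int) (i : Int) (s : Option Int × List Int × Int) (j : Int) :
    Option Int × List Int × Int :=
  if PySem.List.pyGetD arr j 0 > s.2.2 then
    (some j, PySem.List.pySetD (PySem.List.pySetD s.2.1 j i) i j, PySem.List.pyGetD arr j 0)
  else s

-- 'for j in range(i+1,len(arr)): …'
def innerA (arr : List Int) (i : Int) (s : Option Int × List Int × Int) :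
    Option Int × List Int × Int :=
  (PySem.List.pyRange (i + 1) (PySem.List.len arr) 1).foldl (stepA arr i) s

def orderedList (arr : List Int) : List Int :=
  -- arr.index(g) with g ∈ arr always succeeds; getD 0 is never taken
  let arr_index : List Int := arr.map (fun g => (((PySem.List.index? arr g).getD 0 : Nat) : Int))
  -- tmp=None; max_sums reads the first element (IndexError on an empty list — excluded by Pre_)
  let s := (PySem.List.pyRange 0 (PySem.List.len arr - 1) 1).foldl
    (fun s i => innerA arr i s) (none, arr_index, PySem.List.pyGetD arr 0 0)
  s.2.1

-- ===== PORT B =====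
-- B's loop body: on a new running maximum, record it at the maximum's position and at position zero
def stepB (arr : List Int) (s : List Int × Int) (j : Int) : List Int × Int :=
  if PySem.List.pyGetD arr j 0 > s.2 then
    (PySem.List.pySetD (PySem.List.pySetD s.1 j 0) 0 j, PySem.List.pyGetD arr j 0)
  else s

-- 'if x not in first: first[x] = i' over enumerate(arr)
def firstDict (arr : List Int) : PySem.Dict Int Int :=
  (PySem.List.enumerate arr).foldl
    (fun d p => if ¬ PySem.Dict.contains d p.2 then PySem.Dict.insert d p.2 p.1 else d)
    PySem.Dict.empty

def orderedList_alt (arr : List Int) : List Int :=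
  -- res = [first[x] for x in arr]; first[x] always present, getD 0 never taken
  let res : List Int := arr.map (fun x => (PySem.Dict.get? (firstDict arr) x).getD 0)
  -- m reads the first element (IndexError on an empty list — excluded by Pre_)
  let s := (PySem.List.pyRange 1 (PySem.List.len arr) 1).foldl (stepB arr)
    (res, PySem.List.pyGetD arr 0 0)
  s.1

-- ===== PRECONDITION & SPEC =====
-- Pre_ excludes only the empty list, on which A (and B) raise IndexError reading the first element.
def Pre_orderedList (arr : List Int) : Prop := arr ≠ []
instance (arr : List Int) : Decidable (Pre_orderedList arr) := by
  unfold Pre_orderedList; infer_instance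

def pvWitness_orderedList : List Int := [3, 1, 4, 1, 5]

def Spec_orderedList (arr : List Int) (out : List Int) : Prop := out = orderedList_alt arr
instance (arr : List Int) (out : List Int) : Decidable (Spec_orderedList arr out) := by
  unfold Spec_orderedList; infer_instance

-- ===== CLAIM (what is proved, stated in full; the proofs are below) =====
def Claim_equal_orderedList : Prop :=
  ∀ (arr : List Int), Dom_orderedList arr → Pre_orderedList arr →
    Spec_orderedList arr (orderedList arr)

-- ===== LEMMAS AND PROOFS =====

-- the fold never changes the binding of a key already present
theorem firstDict_get_of_contains (xs : List Int) (s : Int) (d : PySem.Dict Int Int) (x : Int)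
    (hc : d.contains x = true) :
    ((PySem.List.enumerate xs s).foldl
      (fun d p => if ¬ PySem.Dict.contains d p.2 then PySem.Dict.insert d p.2 p.1 else d)
      d).get? x = d.get? x := by
  induction xs generalizing s d with
  | nil => simp [PySem.List.enumerate_nil]
  | cons y ys ih =>
    rw [PySem.List.enumerate_cons]
    simp only [List.foldl_cons]
    by_cases hcy : PySem.Dict.contains d y = true
    · rw [if_neg (not_not_intro hcy)]
      exact ih (s + 1) d hc
    · have hxy : x ≠ y := fun h => by rw [h] at hc; exact hcy hc
      rw [if_pos hcy,
          ih (s + 1) _ (by rw [PySem.Dict.contains_insert]; simp [hc]),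
          PySem.Dict.get?_insert_of_ne _ _ hxy]

-- a key not yet present ends up bound to its first occurrence (shifted by the start s)
theorem firstDict_get_of_not_contains (xs : List Int) (s : Int) (d : PySem.Dict Int Int)
    (x : Int) (hc : d.contains x = false) :
    ((PySem.List.enumerate xs s).foldl
      (fun d p => if ¬ PySem.Dict.contains d p.2 then PySem.Dict.insert d p.2 p.1 else d)
      d).get? x = (PySem.List.index? xs x).map (fun k : Nat => s + (k : Int)) := by
  induction xs generalizing s d with
  | nil =>
    rw [PySem.List.enumerate_nil]
    rw [(PySem.List.index?_eq_none_iff _ _).mpr (by simp)]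
    simp only [List.foldl_nil, Option.map_none]
    exact (PySem.Dict.get?_eq_none_iff_contains d x).mpr hc
  | cons y ys ih =>
    rw [PySem.List.enumerate_cons]
    simp only [List.foldl_cons]
    by_cases hxy : x = y
    · subst hxy
      rw [if_pos (by rw [hc]; simp)]
      rw [firstDict_get_of_contains ys (s + 1) _ x (PySem.Dict.contains_insert_self _ _ _),
          PySem.Dict.get?_insert_self, PySem.List.index?_cons_self]
      simp
    · rw [PySem.List.index?_cons_of_ne _ (Ne.symm hxy)]
      by_cases hcy : PySem.Dict.contains d y = true
      · rw [if_neg (not_not_intro hcy)]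
        rw [ih (s + 1) d hc, Option.map_map]
        congr 1
        funext k
        simp only [Function.comp]
        push_cast
        ring
      · rw [if_pos hcy]
        rw [ih (s + 1) _ (by rw [PySem.Dict.contains_insert, hc]; simp [hxy]),
            Option.map_map]
        congr 1
        funext k
        simp only [Function.comp]
        push_cast
        ring

-- B's initial list equals A's arr.index list
theorem res_eq_arr_index (arr : List Int) :
    arr.map (fun x => (PySem.Dict.get? (firstDict arr) x).getD 0)
      = arr.map (fun g => (((PySem.List.index? arr g).getD 0 : Nat) : Int)) := by
  apply List.map_congr_left
  intro x hx
  rw [firstDict, firstDict_get_of_not_contains arr 0 PySem.Dict.empty x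
        (PySem.Dict.contains_empty x)]
  simp only [PySem.List.index?_eq_idxOf?]
  cases List.idxOf? x arr with
  | none => simp
  | some k => simp

-- A's inner loop at i = 0 is B's loop (tmp rides along unused)
theorem foldl_stepA_zero (arr : List Int) (js : List Int) (t : Option Int)
    (p : List Int × Int) :
    (js.foldl (stepA arr 0) (t, p)).2 = js.foldl (stepB arr) p := by
  induction js generalizing t p with
  | nil => rfl
  | cons j js ih =>
    simp only [List.foldl_cons, stepA, stepB]
    by_cases h : PySem.List.pyGetD arr j 0 > p.2
    · rw [if_pos h, if_pos h]
      exact ih (some j) _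
    · rw [if_neg h, if_neg h]
      exact ih t p

-- after B's loop the running maximum dominates the start value and every visited element
theorem stepB_max (arr : List Int) (js : List Int) (p : List Int × Int) :
    p.2 ≤ (js.foldl (stepB arr) p).2 ∧
      ∀ j ∈ js, PySem.List.pyGetD arr j 0 ≤ (js.foldl (stepB arr) p).2 := by
  induction js generalizing p with
  | nil => exact ⟨le_refl _, by simp⟩
  | cons j js ih =>
    simp only [List.foldl_cons, stepB]
    by_cases h : PySem.List.pyGetD arr j 0 > p.2
    · rw [if_pos h]
      obtain ⟨h1, h2⟩ := ih (PySem.List.pySetD (PySem.List.pySetD p.1 j 0) 0 j,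
        PySem.List.pyGetD arr j 0)
      refine ⟨le_of_lt (lt_of_lt_of_le h h1), ?_⟩
      intro j' hj'
      rcases List.mem_cons.mp hj' with rfl | hmem
      · exact h1
      · exact h2 j' hmem
    · rw [if_neg h]
      obtain ⟨h1, h2⟩ := ih p
      refine ⟨h1, ?_⟩
      intro j' hj'
      rcases List.mem_cons.mp hj' with rfl | hmem
      · exact le_trans (not_lt.mp h) h1
      · exact h2 j' hmem

-- A's inner loop is the identity once the state's max dominates all its elements
theorem foldl_stepA_id (arr : List Int) (i : Int) (js : List Int)
    (s : Option Int × List Int × Int)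
    (h : ∀ j ∈ js, PySem.List.pyGetD arr j 0 ≤ s.2.2) :
    js.foldl (stepA arr i) s = s := by
  induction js with
  | nil => rfl
  | cons j js ih =>
    have hj := h j List.mem_cons_self
    simp only [List.foldl_cons, stepA]
    rw [if_neg (not_lt.mpr hj)]
    exact ih (fun j' hj' => h j' (List.mem_cons_of_mem _ hj'))

-- the whole tail of A's outer loop is the identity
theorem foldl_innerA_id (arr : List Int) (is : List Int)
    (s : Option Int × List Int × Int)
    (his : ∀ i ∈ is, (0 : Int) ≤ i)
    (h : ∀ j : Int, 0 ≤ j → j < PySem.List.len arr → PySem.List.pyGetD arr j 0 ≤ s.2.2) :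
    is.foldl (fun s i => innerA arr i s) s = s := by
  induction is with
  | nil => rfl
  | cons i is ih =>
    simp only [List.foldl_cons]
    rw [innerA, foldl_stepA_id]
    · exact ih (fun i' hi' => his i' (List.mem_cons_of_mem _ hi'))
    · intro j hj
      have hmem := PySem.List.mem_pyRange_one.mp hj
      have hi0 := his i List.mem_cons_self
      exact h j (by omega) hmem.2

-- ===== VERDICT (by name: the statement is the Claim_ definition above) =====
theorem orderedList_spec : Claim_equal_orderedList := by
  intro arr _hdom hpre
  unfold Spec_orderedList orderedList orderedList_alt
  rw [res_eq_arr_index]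
  set idx0 := arr.map (fun g => (((PySem.List.index? arr g).getD 0 : Nat) : Int)) with hidx0
  set n : Int := PySem.List.len arr with hn
  have hn1 : 1 ≤ n := by
    rw [hn, PySem.List.len_eq]
    have : arr.length ≠ 0 := fun h => hpre (List.eq_nil_of_length_eq_zero h)
    omega
  by_cases h2 : 2 ≤ n
  · -- outer range splits as 0 :: rest
    have hcons : PySem.List.pyRange 0 (n - 1) 1 = 0 :: PySem.List.pyRange 1 (n - 1) 1 :=
      PySem.List.pyRange_one_cons (by omega)
    rw [hcons]
    simp only [List.foldl_cons]
    rw [innerA]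
    have hz : (0 : Int) + 1 = 1 := by norm_num
    rw [hz]
    set p0 : List Int × Int := (idx0, PySem.List.pyGetD arr 0 0) with hp0
    have hinner := foldl_stepA_zero arr (PySem.List.pyRange 1 n 1) none p0
    set sA := (PySem.List.pyRange 1 n 1).foldl (stepA arr 0) (none, p0) with hsA
    set pB := (PySem.List.pyRange 1 n 1).foldl (stepB arr) p0 with hpB
    have hmax := stepB_max arr (PySem.List.pyRange 1 n 1) p0
    have hdom : ∀ j : Int, 0 ≤ j → j < n → PySem.List.pyGetD arr j 0 ≤ sA.2.2 := by
      intro j hj0 hjn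
      rw [hinner]
      rcases eq_or_lt_of_le hj0 with rfl | hj1
      · exact hmax.1
      · exact hmax.2 j (PySem.List.mem_pyRange_one.mpr ⟨by omega, hjn⟩)
    rw [foldl_innerA_id arr _ sA
        (fun i hi => by have := PySem.List.mem_pyRange_one.mp hi; omega) hdom, hinner]
  · -- n = 1: both loops are empty
    have hne : n = 1 := by omega
    rw [hne]
    rw [show (1 : Int) - 1 = 0 from rfl]
    rw [PySem.List.pyRange_one_eq_nil (le_refl 0), PySem.List.pyRange_one_eq_nil (le_refl 1)]
    rfl
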